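-- pv_equiv track=rewrite | github.com/EdwinTh/advent_of_code | AoC_2025/day_03/script03.py | find_max_digit_i
-- ===== SOURCE A (Python) =====
-- def find_max_digit_i(digits, i_start=0):
--     max_d = "0"
--     max_i = i_start
--     for i,d in enumerate(digits):
--         if d > max_d:
--             max_d = d
--             max_i = i + i_start
--     return max_i
-- ===== SOURCE B (Python) =====
-- def find_max_digit_i(digits, i_start=0):
--     best = max(digits, default="0")
--     if best <= "0":
--         return i_start
--     return i_start + digits.index(best)
-- ===== Notes on version B (the rewrite author's own statement) =====
-- stated objective: simpler
-- what changed: Replaces A's single scan carrying a running (max, index) pair over enumerate(digits) with a two-pass compute-then-locate: max(digits, default="0") followed by digits.index(best), returning i_start when the max does not exceed the "0" baseline.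
import Mathlib
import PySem

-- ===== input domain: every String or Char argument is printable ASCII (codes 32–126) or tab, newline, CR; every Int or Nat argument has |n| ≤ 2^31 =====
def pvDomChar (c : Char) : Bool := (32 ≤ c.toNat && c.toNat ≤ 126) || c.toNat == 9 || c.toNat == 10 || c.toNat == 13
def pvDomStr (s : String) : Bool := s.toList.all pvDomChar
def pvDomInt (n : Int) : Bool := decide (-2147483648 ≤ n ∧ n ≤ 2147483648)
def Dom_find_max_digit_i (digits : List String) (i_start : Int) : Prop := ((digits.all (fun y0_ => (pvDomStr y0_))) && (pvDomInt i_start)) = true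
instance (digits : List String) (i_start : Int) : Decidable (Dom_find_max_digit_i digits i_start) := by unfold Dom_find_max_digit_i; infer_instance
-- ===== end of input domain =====

-- B is a simpler two-pass compute-then-locate rewrite: max(digits, default="0") then
-- digits.index(best), instead of A's single scan carrying a running (max, index) pair.

-- ===== PORT A =====
-- running-max loop over enumerate(digits), state (max_d, max_i)
def find_max_digit_i (digits : List String) (i_start : Int) : Int :=
  ((PySem.List.enumerate digits 0).foldl
    (fun (acc : String × Int) p => if acc.1 < p.2 then (p.2, p.1 + i_start) else acc)
    ("0", i_start)).2

-- ===== PORT B =====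
-- best = max(digits, default="0"); if best <= "0": i_start else i_start + digits.index(best)
-- (.getD 0 only totalises list.index; when the branch is taken, best ∈ digits, so it never fires)
def find_max_digit_i_alt (digits : List String) (i_start : Int) : Int :=
  let best := PySem.List.maxD digits (fun s => s) "0"
  if best ≤ "0" then i_start
  else i_start + ((PySem.List.index? digits best).getD 0 : Int)

-- ===== PRECONDITION & SPEC =====
def Spec_find_max_digit_i (digits : List String) (i_start : Int) (out : Int) : Prop := out = find_max_digit_i_alt digits i_start
instance (digits : List String) (i_start : Int) (out : Int) : Decidable (Spec_find_max_digit_i digits i_start out) := by unfold Spec_find_max_digit_i; infer_instance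

-- ===== CLAIM (what is proved, stated in full; the proofs are below) =====
def Claim_equal_find_max_digit_i : Prop := ∀ (digits : List String) (i_start : Int), Dom_find_max_digit_i digits i_start → Spec_find_max_digit_i digits i_start (find_max_digit_i digits i_start)

-- ===== LEMMAS AND PROOFS =====

-- A's loop computes the running max and (with offset k + i0) the index of its FIRST occurrence.
lemma loopA_char (i0 : Int) (l : List String) (m : String) (mi k : Int) :
    (PySem.List.enumerate l k).foldl
      (fun (acc : String × Int) p => if acc.1 < p.2 then (p.2, p.1 + i0) else acc) (m, mi)
    = if m < l.foldl max m then
        (l.foldl max m, (k + ((PySem.List.index? l (l.foldl max m)).getD 0 : Int)) + i0)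
      else (m, mi) := by
  induction l generalizing m mi k with
  | nil => simp [PySem.List.enumerate]
  | cons d t ih =>
    rw [PySem.List.enumerate_cons]
    simp only [List.foldl]
    by_cases hmd : m < d
    · have hstep : (if (m, mi).1 < (k, d).2 then ((k, d).2, (k, d).1 + i0) else (m, mi)) = (d, k + i0) := by
        simp [hmd]
      rw [hstep, ih]
      simp only [max_eq_right (le_of_lt hmd)]
      have hdM : d ≤ t.foldl max d := (PySem.List.le_foldl_max t d).1
      by_cases hd : d < t.foldl max d
      · have hne : d ≠ t.foldl max d := ne_of_lt hd
        have hmem : t.foldl max d ∈ t := by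
          rcases PySem.List.foldl_max_mem t d with h | h
          · exact absurd h.symm (ne_of_lt hd)
          · exact h
        obtain ⟨j, hj⟩ := Option.isSome_iff_exists.mp
          ((PySem.List.index?_isSome_iff t (t.foldl max d)).mpr hmem)
        rw [PySem.List.index?_cons_of_ne t hne, hj]
        simp only [if_pos hd, if_pos (lt_of_lt_of_le hmd hdM), Option.map_some,
          Option.getD_some, Prod.mk.injEq]
        exact ⟨trivial, by push_cast; ring⟩
      · have hMd : t.foldl max d = d := le_antisymm (not_lt.mp hd) hdM
        rw [hMd, if_pos hmd, PySem.List.index?_cons_self]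
        simp
    · have hstep : (if (m, mi).1 < (k, d).2 then ((k, d).2, (k, d).1 + i0) else (m, mi)) = (m, mi) := by
        simp [hmd]
      rw [hstep, ih]
      have hdm : d ≤ m := not_lt.mp hmd
      simp only [max_eq_left hdm]
      by_cases hm : m < t.foldl max m
      · have hne : d ≠ t.foldl max m := ne_of_lt (lt_of_le_of_lt hdm hm)
        have hmem : t.foldl max m ∈ t := by
          rcases PySem.List.foldl_max_mem t m with h | h
          · exact absurd h.symm (ne_of_lt hm)
          · exact h
        obtain ⟨j, hj⟩ := Option.isSome_iff_exists.mp
          ((PySem.List.index?_isSome_iff t (t.foldl max m)).mpr hmem)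
        rw [PySem.List.index?_cons_of_ne t hne, hj]
        simp only [if_pos hm, Option.map_some, Option.getD_some, Prod.mk.injEq]
        exact ⟨trivial, by push_cast; ring⟩
      · simp [hm]

-- foldl max commutes with a max'ed-in seed
lemma foldl_max_comm (t : List String) (a : String) : ∀ b, t.foldl max (max a b) = max a (t.foldl max b) := by
  induction t with
  | nil => intro b; rfl
  | cons c t ih =>
    intro b
    simp only [List.foldl_cons]
    rw [max_assoc, ih]

-- ===== VERDICT (by name: the statement is the Claim_ definition above) =====
theorem find_max_digit_i_spec : Claim_equal_find_max_digit_i := by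
  intro digits i0 _
  unfold Spec_find_max_digit_i find_max_digit_i find_max_digit_i_alt
  cases digits with
  | nil => simp [PySem.List.enumerate, PySem.List.maxD, PySem.List.max?]
  | cons x t =>
    rw [loopA_char]
    have hbest : PySem.List.maxD (x :: t) (fun s => s) "0" = t.foldl max x := by
      simp [PySem.List.maxD, PySem.List.max?_id_cons]
    have hM : (x :: t).foldl max ("0" : String) = max "0" (t.foldl max x) := by
      simp only [List.foldl_cons]
      rw [show (max ("0" : String) x) = max "0" (List.foldl max x []) from rfl]
      exact foldl_max_comm t "0" x
    rw [hbest, hM]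
    by_cases h : ("0" : String) < t.foldl max x
    · rw [if_pos (by rw [max_eq_right (le_of_lt h)]; exact h),
          if_neg (not_le.mpr h), max_eq_right (le_of_lt h)]
      ring
    · rw [if_neg (by rw [max_eq_left (not_lt.mp h)]; exact lt_irrefl _),
          if_pos (not_lt.mp h)]
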